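-- pv_equiv track=rewrite | github.com/rafay-47/CyberCrack_website | app/services/job_analyzer.py | _get_frequency_distribution
-- ===== SOURCE A (Python) =====
-- from collections import Counter, defaultdict, OrderedDict
-- from typing import List, Dict, Any, Optional, Set, Tuple
--
-- def _get_frequency_distribution(items: List[str]) -> Dict[str, int]:
--     """Calculate frequency distribution ranges"""
--     if not items:
--         return {}
--
--     counter = Counter(items)
--     freq_counts = Counter(counter.values())
--
--     return {
--         'single_occurrence': freq_counts.get(1, 0),
--         'low_frequency_2_5': sum(freq_counts.get(i, 0) for i in range(2, 6)),
--         'medium_frequency_6_10': sum(freq_counts.get(i, 0) for i in range(6, 11)),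
--         'high_frequency_11_plus': sum(freq_counts.get(i, 0) for i in range(11, max(freq_counts.keys()) + 1)) if freq_counts else 0
--     }
-- ===== SOURCE B (Python) =====
-- from collections import Counter
--
-- def _get_frequency_distribution(items):
--     """Calculate frequency distribution ranges (single pass over the item counts)."""
--     if not items:
--         return {}
--     single = low = medium = high = 0
--     for f in Counter(items).values():
--         if f == 1:
--             single += 1
--         elif f <= 5:
--             low += 1
--         elif f <= 10:
--             medium += 1
--         else:
--             high += 1
--     return {
--         'single_occurrence': single,
--         'low_frequency_2_5': low,
--         'medium_frequency_6_10': medium,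
--         'high_frequency_11_plus': high,
--     }
-- ===== Notes on version B (the rewrite author's own statement) =====
-- stated objective: simpler
-- what changed: Replaces the frequency-of-frequencies Counter and the three fixed-range generator sums (including the max-keyed open-ended range) by a single if/elif bucket loop over the item counts.
import Mathlib
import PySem

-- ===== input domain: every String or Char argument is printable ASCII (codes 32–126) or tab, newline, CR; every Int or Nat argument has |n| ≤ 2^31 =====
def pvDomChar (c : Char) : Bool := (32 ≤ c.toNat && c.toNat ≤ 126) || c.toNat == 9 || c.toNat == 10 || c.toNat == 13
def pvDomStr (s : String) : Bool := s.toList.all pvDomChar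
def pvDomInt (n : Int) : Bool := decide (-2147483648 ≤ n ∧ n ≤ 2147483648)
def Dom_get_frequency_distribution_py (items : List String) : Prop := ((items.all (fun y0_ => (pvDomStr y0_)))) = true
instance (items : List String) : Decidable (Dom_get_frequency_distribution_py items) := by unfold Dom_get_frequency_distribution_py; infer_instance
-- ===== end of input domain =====

-- B replaces A's frequency-of-frequencies Counter and fixed-range sums by a single if/elif bucket loop over the item counts (simpler decomposition).


-- ===== PORT A =====
def get_frequency_distribution_py (items : List String) : List (String × Int) :=
  if items = [] then []
  else
    let counter := PySem.Dict.counter items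
    let freq := PySem.Dict.counter counter.values
    [("single_occurrence", freq.getD 1 0),
     ("low_frequency_2_5", ((PySem.List.pyRange 2 6).map (fun i => freq.getD i 0)).sum),
     ("medium_frequency_6_10", ((PySem.List.pyRange 6 11).map (fun i => freq.getD i 0)).sum),
     ("high_frequency_11_plus",
       if freq.items = [] then 0  -- 'if freq_counts else 0' (freq_counts is truthy iff nonempty)
       else
         match PySem.List.max? freq.keys (fun k => k) with  -- max(freq_counts.keys())
         | some m => ((PySem.List.pyRange 11 (m + 1)).map (fun i => freq.getD i 0)).sum
         | none => 0)]  -- unreachable: freq nonempty here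

-- ===== PORT B =====
-- one bucket-update step of B's for-loop (the if/elif chain over a count f)
def pvBucketStep (acc : Int × Int × Int × Int) (f : Int) : Int × Int × Int × Int :=
  if f = 1 then (acc.1 + 1, acc.2.1, acc.2.2.1, acc.2.2.2)
  else if f ≤ 5 then (acc.1, acc.2.1 + 1, acc.2.2.1, acc.2.2.2)
  else if f ≤ 10 then (acc.1, acc.2.1, acc.2.2.1 + 1, acc.2.2.2)
  else (acc.1, acc.2.1, acc.2.2.1, acc.2.2.2 + 1)

def get_frequency_distribution_py_alt (items : List String) : List (String × Int) :=
  if items = [] then []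
  else
    let r := (PySem.Dict.counter items).values.foldl pvBucketStep (0, 0, 0, 0)
    [("single_occurrence", r.1),
     ("low_frequency_2_5", r.2.1),
     ("medium_frequency_6_10", r.2.2.1),
     ("high_frequency_11_plus", r.2.2.2)]

-- ===== PRECONDITION & SPEC =====
def Spec_get_frequency_distribution_py (items : List String) (out : List (String × Int)) : Prop := out = get_frequency_distribution_py_alt items
instance (items : List String) (out : List (String × Int)) : Decidable (Spec_get_frequency_distribution_py items out) := by unfold Spec_get_frequency_distribution_py; infer_instance

-- ===== CLAIM (what is proved, stated in full; the proofs are below) =====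
def Claim_equal_get_frequency_distribution_py : Prop := ∀ (items : List String), Dom_get_frequency_distribution_py items → Spec_get_frequency_distribution_py items (get_frequency_distribution_py items)

-- ===== LEMMAS AND PROOFS =====

-- B's loop: the quadruple fold counts the four mutually exclusive bucket predicates
lemma pv_fold4 (vs : List Int) (a b c d : Int) :
    vs.foldl pvBucketStep (a, b, c, d) =
      (a + (vs.countP (fun f => decide (f = 1)) : Int),
       b + (vs.countP (fun f => decide (f ≠ 1 ∧ f ≤ 5)) : Int),
       c + (vs.countP (fun f => decide (¬ f ≤ 5 ∧ f ≤ 10)) : Int),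
       d + (vs.countP (fun f => decide (¬ f ≤ 10)) : Int)) := by
  induction vs generalizing a b c d with
  | nil => simp
  | cons v vs ih =>
    simp only [List.foldl_cons, pvBucketStep, List.countP_cons]
    split_ifs with h1 h2 h3 <;> rw [ih] <;> simp_all <;> omega

lemma pv_countP_mem_cons (i : Int) (r : List Int) (hi : i ∉ r) (vs : List Int) :
    vs.countP (fun v => decide (v ∈ i :: r))
      = vs.count i + vs.countP (fun v => decide (v ∈ r)) := by
  induction vs with
  | nil => simp
  | cons v vs ihv =>
    simp only [List.countP_cons, List.count_cons, ihv]
    by_cases hv : v = i <;> by_cases hv2 : v ∈ r <;> simp [hv, hv2] <;> simp_all <;> omega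

-- sum over a duplicate-free index list of per-index counts = count of membership
lemma pv_sum_count (r : List Int) (hr : r.Nodup) (vs : List Int) :
    (r.map (fun i => ((vs.count i : Nat) : Int))).sum
      = ((vs.countP (fun v => decide (v ∈ r)) : Nat) : Int) := by
  induction r with
  | nil => simp
  | cons i r ih =>
    rcases List.nodup_cons.mp hr with ⟨hi, hr'⟩
    rw [List.map_cons, List.sum_cons, ih hr', pv_countP_mem_cons i r hi vs]
    push_cast; ring

lemma pv_nodup_pyRange (a b : Int) : (PySem.List.pyRange a b).Nodup := by
  rw [PySem.List.pyRange_of_pos a b (by norm_num : (0:Int) < 1)]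
  exact (List.nodup_range).map (fun x y h => by omega)

-- A's per-bucket sum over range(a, b) counts the predicate 'a ≤ v < b'
lemma pv_range_sum (a b : Int) (vs : List Int) (p : Int → Bool)
    (hp : ∀ v ∈ vs, (p v = true ↔ (a ≤ v ∧ v < b))) :
    ((PySem.List.pyRange a b).map (fun i => (PySem.Dict.counter vs).getD i 0)).sum
      = (vs.countP p : Int) := by
  simp only [PySem.Dict.getD_counter]
  rw [pv_sum_count _ (pv_nodup_pyRange a b) vs]
  congr 1
  apply List.countP_congr
  intro x hx
  simp [PySem.List.mem_pyRange_one, hp x hx]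

-- every value of Counter(items) is a positive count
lemma pv_values_pos (items : List String) :
    ∀ v ∈ (PySem.Dict.counter items).values, 1 ≤ v := by
  intro v hv
  have hval : (PySem.Dict.counter items).values
      = (PySem.Set.ofList items).map (fun k => ((items.count k : Nat) : Int)) := by
    simp [PySem.Dict.values, PySem.Dict.items_counter]
  rw [hval] at hv
  rcases List.mem_map.mp hv with ⟨k, hk, rfl⟩
  have hkm : k ∈ items := (PySem.Set.mem_ofList items k).mp hk
  have := List.count_pos_iff.mpr hkm
  exact_mod_cast this

-- ===== VERDICT (by name: the statement is the Claim_ definition above) =====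
theorem get_frequency_distribution_py_spec : Claim_equal_get_frequency_distribution_py := by
  intro items _
  unfold Spec_get_frequency_distribution_py
  unfold get_frequency_distribution_py get_frequency_distribution_py_alt
  by_cases h : items = []
  · simp [h]
  · simp only [if_neg h]
    set vs := (PySem.Dict.counter items).values with hvs
    have hpos : ∀ v ∈ vs, 1 ≤ v := pv_values_pos items
    have hvs_ne : vs ≠ [] := by
      obtain ⟨x, t, rfl⟩ := List.exists_cons_of_ne_nil h
      have hx : x ∈ PySem.Set.ofList (x :: t) := (PySem.Set.mem_ofList _ x).mpr (by simp)
      have : vs = (PySem.Set.ofList (x :: t)).map (fun k => (((x :: t).count k : Nat) : Int)) := by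
        simp [hvs, PySem.Dict.values, PySem.Dict.items_counter]
      rw [this]
      simp only [ne_eq, List.map_eq_nil_iff]
      exact fun hnil => by simp [hnil] at hx
    have hfi : (PySem.Dict.counter vs).items ≠ [] := by
      rw [PySem.Dict.items_counter]
      obtain ⟨y, u, hyu⟩ := List.exists_cons_of_ne_nil hvs_ne
      have hy : y ∈ PySem.Set.ofList vs := (PySem.Set.mem_ofList _ y).mpr (by rw [hyu]; simp)
      simp only [ne_eq, List.map_eq_nil_iff]
      exact fun hnil => by simp [hnil] at hy
    have hkeys : (PySem.Dict.counter vs).keys = PySem.Set.ofList vs := PySem.Dict.keys_counter vs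
    obtain ⟨m, hm⟩ : ∃ m, PySem.List.max? (PySem.Dict.counter vs).keys (fun k => k) = some m := by
      cases e : PySem.List.max? (PySem.Dict.counter vs).keys (fun k => k) with
      | none =>
        exfalso
        have := (PySem.List.max?_eq_none_iff _ _).mp e
        rw [hkeys] at this
        obtain ⟨y, u, hyu⟩ := List.exists_cons_of_ne_nil hvs_ne
        have hy : y ∈ PySem.Set.ofList vs := (PySem.Set.mem_ofList _ y).mpr (by rw [hyu]; simp)
        simp [this] at hy
      | some m => exact ⟨m, rfl⟩
    have hmax : ∀ v ∈ vs, v ≤ m := by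
      intro v hv
      exact PySem.List.max?_isMax hm v (by rw [hkeys]; exact (PySem.Set.mem_ofList vs v).mpr hv)
    rw [pv_fold4]
    simp only [if_neg hfi, hm]
    have e1 : (PySem.Dict.counter vs).getD 1 0
        = 0 + (vs.countP (fun f => decide (f = 1)) : Int) := by
      rw [PySem.Dict.getD_counter, zero_add]
      congr 1
    have e2 := pv_range_sum 2 6 vs (fun f => decide (f ≠ 1 ∧ f ≤ 5))
      (by intro v hv; have := hpos v hv; simp; omega)
    have e3 := pv_range_sum 6 11 vs (fun f => decide (¬ f ≤ 5 ∧ f ≤ 10))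
      (by intro v hv; simp; omega)
    have e4 := pv_range_sum 11 (m + 1) vs (fun f => decide (¬ f ≤ 10))
      (by intro v hv; have := hmax v hv; simp; omega)
    rw [e1, e2, e3, e4]
    simp only [zero_add]
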